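-- pv_equiv track=rewrite | github.com/prachijain07/Prachi-programs | src/Exercise_26.py | find_strong_numbers
-- ===== SOURCE A (Python) =====
-- def factorial(number):
--     f=1
--     if(number==0):
--         f=1
--     else:
--         while(number>0):
--             f=f*number
--             number=number-1
--     return f
--
-- def find_strong_numbers(num_list):
--     strong_num_list=[]
--     for num in num_list:
--         if num==0:
--             continue
--         i=num
--         sum1=0
--
--         while(i>0):
--             rem=i%10
--             sum1=sum1+factorial(rem)
--             i=i//10
--
--         if(sum1==num):
--             strong_num_list.append(num)
--
--     return strong_num_list
-- ===== SOURCE B (Python) =====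
-- def find_strong_numbers(num_list):
--     fact = [1, 1, 2, 6, 24, 120, 720, 5040, 40320, 362880]
--     return [num for num in num_list
--             if num > 0 and sum(fact[ord(c) - 48] for c in str(num)) == num]
-- ===== Notes on version B (the rewrite author's own statement) =====
-- stated objective: idiomatic
-- what changed: Replaced the per-number %10-//10 digit loop with a recomputed factorial subroutine by a single filtering comprehension that iterates the decimal string of each number and sums precomputed factorials from a 10-entry lookup table.
import Mathlib
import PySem

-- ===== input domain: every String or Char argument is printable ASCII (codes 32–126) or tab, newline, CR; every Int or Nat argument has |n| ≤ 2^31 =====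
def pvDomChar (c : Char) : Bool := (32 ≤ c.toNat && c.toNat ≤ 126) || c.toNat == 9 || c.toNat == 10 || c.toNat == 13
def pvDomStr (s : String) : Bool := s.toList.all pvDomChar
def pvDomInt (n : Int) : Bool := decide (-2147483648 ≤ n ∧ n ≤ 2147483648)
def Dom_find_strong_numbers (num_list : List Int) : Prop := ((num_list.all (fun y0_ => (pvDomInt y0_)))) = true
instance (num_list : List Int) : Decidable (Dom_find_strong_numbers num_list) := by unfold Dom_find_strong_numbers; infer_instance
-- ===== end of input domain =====

-- B replaces A's %10-//10 digit loop with a per-digit factorial recomputation by a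
-- filtering comprehension over each number's decimal string with a factorial lookup table (objective: idiomatic).

-- ===== PORT A =====
-- 'while number > 0: f = f*number; number = number-1'
def factLoop (f : Int) (number : Int) : Int :=
  if h : 0 < number then factLoop (f * number) (number - 1) else f
termination_by number.toNat
decreasing_by omega

def factorial (number : Int) : Int :=
  if number = 0 then 1 else factLoop 1 number

-- 'while i > 0: rem = i % 10; sum1 = sum1 + factorial(rem); i = i // 10'
def digitLoop (i : Int) (sum1 : Int) : Int :=
  if _h : 0 < i then
    digitLoop (PySem.Int.floordiv i 10) (sum1 + factorial (PySem.Int.mod i 10))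
  else sum1
termination_by i.toNat
decreasing_by
  have h10 : (0:Int) < 10 := by omega
  have := PySem.Int.floordiv_eq_ediv_of_pos (a := i) h10
  rw [this]
  omega

def find_strong_numbers (num_list : List Int) : List Int :=
  num_list.foldl (fun strong_num_list num =>
    if num = 0 then strong_num_list
    else if digitLoop num 0 = num then strong_num_list ++ [num]
    else strong_num_list) []

-- ===== PORT B =====
-- fact = [1, 1, 2, 6, 24, 120, 720, 5040, 40320, 362880]
def factTable : List Int := [1, 1, 2, 6, 24, 120, 720, 5040, 40320, 362880]

-- sum(fact[ord(c) - 48] for c in str(num)); fact[...] never IndexError for num > 0 (digit chars only)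
def strFactSum (num : Int) : Int :=
  (((PySem.Int.toStr num).toList).map
    (fun c => PySem.List.pyGetD factTable ((c.toNat : Int) - 48) 0)).sum

def find_strong_numbers_alt (num_list : List Int) : List Int :=
  num_list.filter (fun num => decide (0 < num) && decide (strFactSum num = num))

-- ===== PRECONDITION & SPEC =====
def Spec_find_strong_numbers (num_list : List Int) (out : List Int) : Prop := out = find_strong_numbers_alt num_list
instance (num_list : List Int) (out : List Int) : Decidable (Spec_find_strong_numbers num_list out) := by unfold Spec_find_strong_numbers; infer_instance

-- ===== CLAIM (what is proved, stated in full; the proofs are below) =====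
def Claim_equal_find_strong_numbers : Prop := ∀ (num_list : List Int), Dom_find_strong_numbers num_list → Spec_find_strong_numbers num_list (find_strong_numbers num_list)

-- ===== LEMMAS AND PROOFS =====

-- A's digit loop, stepped once on a positive input
theorem digitLoop_pos (i sum1 : Int) (h : 0 < i) :
    digitLoop i sum1 = digitLoop (PySem.Int.floordiv i 10) (sum1 + factorial (PySem.Int.mod i 10)) := by
  rw [digitLoop]; simp [h]

theorem digitLoop_nonpos (i sum1 : Int) (h : ¬ 0 < i) : digitLoop i sum1 = sum1 := by
  rw [digitLoop]; simp [h]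

-- A's factorial loop computes f * number!
theorem factLoop_spec (m : Nat) : ∀ f : Int, factLoop f (m : Int) = f * (Nat.factorial m : Int) := by
  induction m with
  | zero => intro f; rw [factLoop]; simp
  | succ m ih =>
    intro f
    rw [factLoop]
    have h1 : ((m : Int) + 1) - 1 = (m : Int) := by ring
    simp only [show (0:Int) < ((m:Nat) + 1 : Nat) from by exact_mod_cast Nat.succ_pos m, dif_pos]
    push_cast
    rw [h1, ih (f * ((m : Int) + 1)), Nat.factorial_succ]
    push_cast
    ring

theorem factorial_nat (m : Nat) : factorial (m : Int) = (Nat.factorial m : Int) := by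
  unfold factorial
  rcases Nat.eq_zero_or_pos m with h | h
  · subst h; simp
  · rw [if_neg (by exact_mod_cast h.ne'), factLoop_spec m 1, one_mul]

-- A's digit loop computes the sum of factorials of the base-10 digits
theorem digitLoop_eq_digits (m : Nat) (sum1 : Int) :
    digitLoop (m : Int) sum1 = sum1 + ((Nat.digits 10 m).map (fun d => ((Nat.factorial d : Nat) : Int))).sum := by
  induction m using Nat.strong_induction_on generalizing sum1 with
  | _ m ih =>
    rcases Nat.eq_zero_or_pos m with hm | hm
    · subst hm
      rw [digitLoop_nonpos _ _ (by omega)]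
      simp
    · rw [digitLoop_pos _ _ (by exact_mod_cast hm)]
      have hfd : PySem.Int.floordiv (m : Int) (10 : Int) = ((m / 10 : Nat) : Int) := by
        exact_mod_cast PySem.Int.floordiv_natCast m 10
      have hmd : PySem.Int.mod (m : Int) (10 : Int) = ((m % 10 : Nat) : Int) := by
        exact_mod_cast PySem.Int.mod_natCast m 10
      rw [hfd, hmd, ih (m / 10) (Nat.div_lt_self hm (by omega)),
        Nat.digits_def' (by omega : (1:Nat) < 10) hm, factorial_nat]
      simp [add_assoc]

-- Nat.toDigits via Nat.digits, for positive n
theorem toDigitsCore_eq (fuel : Nat) : ∀ (n : Nat) (l : List Char), 0 < n → n < fuel →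
    Nat.toDigitsCore 10 fuel n l = ((Nat.digits 10 n).map Nat.digitChar).reverse ++ l := by
  induction fuel with
  | zero => intro n l h hf; omega
  | succ fuel ih =>
    intro n l h hf
    rw [Nat.toDigitsCore, Nat.digits_def' (by omega : (1:Nat) < 10) h]
    by_cases h0 : n / 10 = 0
    · simp [h0]
    · simp only [h0, if_false]
      rw [ih (n / 10) _ (by omega) (by have := Nat.div_lt_self h (by omega : (1:Nat) < 10); omega)]
      simp

theorem toDigits_eq (n : Nat) (h : 0 < n) :
    Nat.toDigits 10 n = ((Nat.digits 10 n).map Nat.digitChar).reverse := by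
  rw [Nat.toDigits, toDigitsCore_eq (n + 1) n [] h (by omega)]
  simp

-- table lookup at a digit's character = that digit's factorial
theorem table_eq_factorial (d : Nat) (hd : d < 10) :
    PySem.List.pyGetD factTable (((Nat.digitChar d).toNat : Int) - 48) 0 = (Nat.factorial d : Int) := by
  interval_cases d <;> decide

-- B's string digit-factorial sum agrees with A's digit loop on positive numbers
theorem strFactSum_eq (num : Int) (h : 0 < num) : strFactSum num = digitLoop num 0 := by
  obtain ⟨m, rfl⟩ : ∃ m : Nat, num = (m : Int) :=
    ⟨num.toNat, (Int.toNat_of_nonneg (le_of_lt h)).symm⟩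
  have hm : 0 < m := by exact_mod_cast h
  rw [digitLoop_eq_digits m 0, zero_add]
  unfold strFactSum
  rw [PySem.Int.toList_toStr]
  show (((PySem.Int.toChars (m : Int))).map _).sum = _
  rw [show PySem.Int.toChars (m : Int) = Nat.toDigits 10 m by
        simp [PySem.Int.toChars, not_lt.mpr (by positivity : (0:Int) ≤ (m:Int))]]
  rw [toDigits_eq m hm, List.map_reverse, List.sum_reverse, List.map_map]
  exact congrArg List.sum (List.map_congr_left fun d hd =>
    table_eq_factorial d (Nat.digits_lt_base (by omega) hd))

-- A's skip/append decision coincides with B's filter predicate, elementwise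
theorem step_eq (acc : List Int) (num : Int) :
    (if num = 0 then acc
     else if digitLoop num 0 = num then acc ++ [num]
     else acc)
    = acc ++ (if decide (0 < num) && decide (strFactSum num = num) then [num] else []) := by
  by_cases h0 : num = 0
  · simp [h0]
  · by_cases hp : 0 < num
    · rw [strFactSum_eq num hp]
      by_cases hs : digitLoop num 0 = num <;> simp [h0, hp, hs]
    · have : digitLoop num 0 = 0 := digitLoop_nonpos num 0 hp
      simp [h0, hp, this, show (0:Int) ≠ num from by omega]

theorem foldl_eq (num_list : List Int) (acc : List Int) :
    num_list.foldl (fun strong_num_list num =>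
      if num = 0 then strong_num_list
      else if digitLoop num 0 = num then strong_num_list ++ [num]
      else strong_num_list) acc
    = acc ++ num_list.filter (fun num => decide (0 < num) && decide (strFactSum num = num)) := by
  induction num_list generalizing acc with
  | nil => simp
  | cons x xs ih =>
    rw [List.foldl_cons, ih, step_eq, List.filter_cons]
    by_cases h : (decide (0 < x) && decide (strFactSum x = x)) = true <;>
      simp [h, List.append_assoc]

-- ===== VERDICT (by name: the statement is the Claim_ definition above) =====
theorem find_strong_numbers_spec : Claim_equal_find_strong_numbers := by
  intro num_list _
  show find_strong_numbers num_list = find_strong_numbers_alt num_list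
  unfold find_strong_numbers find_strong_numbers_alt
  rw [foldl_eq]
  simp
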